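-- pv_equiv track=rewrite | github.com/mroumanos/snap-dependency-risk-assessment | app/code/foodbankscrapy/foodbankscrapy/utils/parsers.py | _trim_balanced_json_prefix
-- ===== SOURCE A (Python) =====
-- from typing import Dict, Iterable, List, Optional
--
-- def _trim_balanced_json_prefix(text: str) -> Optional[str]:
--     if not text:
--         return None
--     start = text.lstrip()
--     if not start or start[0] not in "[{":
--         return None
--
--     opening = start[0]
--     expected_closing = "]" if opening == "[" else "}"
--     stack: List[str] = [expected_closing]
--     in_string = False
--     escape = False
--
--     for idx, ch in enumerate(start[1:], start=1):
--         if in_string: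
--             if escape:
--                 escape = False
--                 continue
--             if ch == "\\":
--                 escape = True
--                 continue
--             if ch == "\"":
--                 in_string = False
--             continue
--
--         if ch == "\"":
--             in_string = True
--             continue
--         if ch == "[":
--             stack.append("]")
--             continue
--         if ch == "{":
--             stack.append("}")
--             continue
--         if ch in "]}":
--             if not stack or ch != stack[-1]:
--                 return None
--             stack.pop()
--             if not stack:
--                 return start[: idx + 1]
--     return None
-- ===== SOURCE B (Python) =====
-- from typing import Optional
--
--
-- def _scan_string(s, i):
--     # i points just past an opening quote; return index just past the closing quote, or None
--     while i < len(s):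
--         c = s[i]
--         if c == '\\':
--             i += 2
--         elif c == '"':
--             return i + 1
--         else:
--             i += 1
--     return None
--
--
-- def _scan(s, i, closer):
--     # consume a balanced body from i up to and including `closer`; return the index just past it
--     while i < len(s):
--         ch = s[i]
--         if ch == '"':
--             j = _scan_string(s, i + 1)
--             if j is None:
--                 return None
--             i = j
--         elif ch == '[':
--             j = _scan(s, i + 1, ']')
--             if j is None:
--                 return None
--             i = j
--         elif ch == '{':
--             j = _scan(s, i + 1, '}')
--             if j is None:
--                 return None
--             i = j
--         elif ch in ']}':
--             return i + 1 if ch == closer else None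
--         else:
--             i += 1
--     return None
--
--
-- def _trim_balanced_json_prefix(text: str) -> Optional[str]:
--     s = text.lstrip()
--     if not s:
--         return None
--     if s[0] == '[':
--         j = _scan(s, 1, ']')
--     elif s[0] == '{':
--         j = _scan(s, 1, '}')
--     else:
--         return None
--     return None if j is None else s[:j]
-- ===== Notes on version B (the rewrite author's own statement) =====
-- stated objective: alternative
-- what changed: Replaced the single loop with an explicit closer stack and in-string/escape flags by a recursive-descent scanner: a string-literal scanner helper and a scan(i, closer) that recurses per nesting level and consumes sub-structures, so no stack container or string-mode flags are maintained.
import Mathlib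
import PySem

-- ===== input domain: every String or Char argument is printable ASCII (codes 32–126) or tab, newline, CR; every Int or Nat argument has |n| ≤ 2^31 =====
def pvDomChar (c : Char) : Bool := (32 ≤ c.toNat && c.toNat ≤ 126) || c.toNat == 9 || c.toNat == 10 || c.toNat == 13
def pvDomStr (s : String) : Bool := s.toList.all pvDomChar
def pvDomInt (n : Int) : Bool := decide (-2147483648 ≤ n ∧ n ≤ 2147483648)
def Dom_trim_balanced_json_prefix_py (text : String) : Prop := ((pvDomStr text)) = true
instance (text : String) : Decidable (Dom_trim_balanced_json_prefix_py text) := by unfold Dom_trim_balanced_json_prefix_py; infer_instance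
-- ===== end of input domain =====

-- B replaces A's explicit closer stack and in-string/escape flags by a recursive-descent
-- scanner (a string-literal scanner plus a per-nesting-level scan); same cost, different structure.

-- ===== PORT A =====
-- the for-loop of A, state = (idx, stack, in_string, escape); early returns become Option results
def aLoop (start : List Char) (idx : Nat) (stack : List Char) (inStr esc : Bool) :
    List Char → Option String
  | [] => none
  | ch :: tl =>
    if inStr then
      if esc then aLoop start (idx + 1) stack inStr false tl
      else if ch == '\\' then aLoop start (idx + 1) stack inStr true tl
      else if ch == '"' then aLoop start (idx + 1) stack false esc tl
      else aLoop start (idx + 1) stack inStr esc tl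
    else if ch == '"' then aLoop start (idx + 1) stack true esc tl
    else if ch == '[' then aLoop start (idx + 1) (stack ++ [']']) inStr esc tl
    else if ch == '{' then aLoop start (idx + 1) (stack ++ ['}']) inStr esc tl
    else if ch == ']' || ch == '}' then
      match stack.getLast? with
      | none => none
      | some top =>
        if ch == top then
          if stack.dropLast = [] then
            some (String.ofList (PySem.List.slice start none (some ((idx : Int) + 1))))
          else aLoop start (idx + 1) stack.dropLast inStr esc tl
        else none
    else aLoop start (idx + 1) stack inStr esc tl

def trim_balanced_json_prefix_py (text : String) : Option String :=
  if text = "" then none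
  else
    match PySem.Chars.lstrip text.toList with
    | [] => none
    | c0 :: rest =>
      if !(c0 == '[' || c0 == '{') then none
      else
        let expected : Char := if c0 == '[' then ']' else '}'
        aLoop (c0 :: rest) 1 [expected] false false rest

-- ===== PORT B =====
-- string-literal scanner: input is the text just past an opening quote; returns
-- (number of chars consumed, including the closing quote, remaining text)
def scanStr : List Char → Option (Nat × List Char)
  | [] => none
  | c :: tl =>
    if c == '\\' then
      match tl with
      | [] => none
      | _ :: tl2 => (scanStr tl2).map (fun p => (p.1 + 2, p.2))
    else if c == '"' then some (1, tl)
    else (scanStr tl).map (fun p => (p.1 + 1, p.2))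

-- recursive-descent scan for a balanced body ending in `closer`; returns the number of
-- chars consumed (Python's absolute index becomes a consumed count over the suffix);
-- fuel = remaining length bounds the while-loop/recursion
def scanB : Nat → Char → List Char → Option Nat
  | 0, _, _ => none
  | _ + 1, _, [] => none
  | fuel + 1, closer, ch :: tl =>
    if ch == '"' then
      match scanStr tl with
      | none => none
      | some (n, r) => (scanB fuel closer r).map (fun k => 1 + n + k)
    else if ch == '[' then
      match scanB fuel ']' tl with
      | none => none
      | some m => (scanB fuel closer (tl.drop m)).map (fun k => 1 + m + k)
    else if ch == '{' then
      match scanB fuel '}' tl with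
      | none => none
      | some m => (scanB fuel closer (tl.drop m)).map (fun k => 1 + m + k)
    else if ch == ']' || ch == '}' then
      if ch == closer then some 1 else none
    else (scanB fuel closer tl).map (fun k => 1 + k)

def trim_balanced_json_prefix_py_alt (text : String) : Option String :=
  match PySem.Chars.lstrip text.toList with
  | [] => none
  | c0 :: rest =>
    if c0 == '[' then
      (scanB rest.length ']' rest).map
        (fun j => String.ofList (PySem.List.slice (c0 :: rest) none (some ((1 + j : Nat) : Int))))
    else if c0 == '{' then
      (scanB rest.length '}' rest).map
        (fun j => String.ofList (PySem.List.slice (c0 :: rest) none (some ((1 + j : Nat) : Int))))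
    else none

-- ===== PRECONDITION & SPEC =====
def Spec_trim_balanced_json_prefix_py (text : String) (out : Option String) : Prop := out = trim_balanced_json_prefix_py_alt text
instance (text : String) (out : Option String) : Decidable (Spec_trim_balanced_json_prefix_py text out) := by unfold Spec_trim_balanced_json_prefix_py; infer_instance

-- ===== CLAIM (what is proved, stated in full; the proofs are below) =====
def Claim_equal_trim_balanced_json_prefix_py : Prop := ∀ (text : String), Dom_trim_balanced_json_prefix_py text → Spec_trim_balanced_json_prefix_py text (trim_balanced_json_prefix_py text)

-- ===== LEMMAS AND PROOFS =====

theorem scanStr_drop (l : List Char) : ∀ (n : Nat) (r : List Char),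
    scanStr l = some (n, r) → r = l.drop n ∧ 1 ≤ n ∧ n ≤ l.length := by
  fun_induction scanStr l <;> intro n r h
  case case1 => simp at h
  case case2 => simp at h
  case case3 c hbs x tl2 ih =>
    rw [Option.map_eq_some_iff] at h
    obtain ⟨⟨n', r'⟩, hp, he⟩ := h
    obtain ⟨h1, h2, h3⟩ := ih n' r' hp
    cases he
    refine ⟨?_, by omega, by simp only [List.length_cons]; omega⟩
    rw [h1]
    show List.drop n' tl2 = List.drop (n' + 1 + 1) (c :: x :: tl2)
    simp [List.drop_succ_cons]
  case case4 => simp at h; obtain ⟨h1, h2⟩ := h; subst h1; subst h2; simp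
  case case5 c tl hbs hq ih =>
    rw [Option.map_eq_some_iff] at h
    obtain ⟨⟨n', r'⟩, hp, he⟩ := h
    obtain ⟨h1, h2, h3⟩ := ih n' r' hp
    cases he
    refine ⟨?_, by omega, by simp only [List.length_cons]; omega⟩
    rw [h1]
    show List.drop n' tl = List.drop (n' + 1) (c :: tl)
    simp [List.drop_succ_cons]


theorem aLoop_string (l : List Char) : ∀ (start : List Char) (idx : Nat) (st : List Char),
    aLoop start idx st true false l =
      match scanStr l with
      | none => none
      | some (n, _) => aLoop start (idx + n) st false false (l.drop n) := by
  fun_induction scanStr l <;> intro start idx st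
  case case1 => simp [aLoop, scanStr]
  case case2 hbs => simp [aLoop, scanStr, hbs]
  case case3 c hbs x tl2 ih =>
    cases hs : scanStr tl2 with
    | none => simp [aLoop, scanStr, hbs, ih, hs]
    | some p =>
      obtain ⟨n, r⟩ := p
      have h2 : idx + 1 + 1 + n = idx + (n + 2) := by omega
      simp [aLoop, scanStr, hbs, ih, hs, h2, List.drop_succ_cons]
  case case4 c hbs hq =>
    simp only [aLoop, scanStr, hbs, hq]
    simp [List.drop_succ_cons]
  case case5 c tl hbs hq ih =>
    cases hs : scanStr tl with
    | none => simp [aLoop, scanStr, hbs, hq, ih, hs]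
    | some p =>
      obtain ⟨n, r⟩ := p
      have h2 : idx + 1 + n = idx + (n + 1) := by omega
      simp [aLoop, scanStr, hbs, hq, ih, hs, h2, List.drop_succ_cons]


theorem aLoop_scanB (fuel : Nat) : ∀ (l : List Char), l.length ≤ fuel →
    ∀ (start : List Char) (idx : Nat) (st : List Char) (c : Char),
    aLoop start idx (st ++ [c]) false false l =
      match scanB fuel c l with
      | none => none
      | some n =>
        if st = [] then
          some (String.ofList (PySem.List.slice start none (some ((idx + n : Nat) : Int))))
        else aLoop start (idx + n) st false false (l.drop n) := by
  induction fuel with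
  | zero =>
    intro l hlen start idx st c
    cases l with
    | nil => simp [aLoop, scanB]
    | cons ch tl => simp at hlen
  | succ fuel ih =>
    intro l hlen start idx st c
    cases l with
    | nil => simp [aLoop, scanB]
    | cons ch tl =>
      simp only [List.length_cons] at hlen
      have htl : tl.length ≤ fuel := by omega
      by_cases hq : (ch == '"') = true
      · have hA : aLoop start idx (st ++ [c]) false false (ch :: tl)
            = aLoop start (idx + 1) (st ++ [c]) true false tl := by
          simp [aLoop, hq]
        rw [hA, aLoop_string]
        cases hs : scanStr tl with
        | none => simp [scanB, hq, hs]
        | some p =>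
          obtain ⟨n, r⟩ := p
          obtain ⟨hr, hn1, hn2⟩ := scanStr_drop tl n r hs
          dsimp only
          rw [ih (tl.drop n) (by simp; omega)]
          simp only [scanB, hq, hs, if_pos, hr]
          cases hb : scanB fuel c (tl.drop n) with
          | none => simp
          | some k =>
            have h1 : idx + 1 + n + k = idx + (1 + n + k) := by omega
            have h2 : (tl.drop n).drop k = (ch :: tl).drop (1 + n + k) := by
              rw [show 1 + n + k = (n + k) + 1 by omega, List.drop_succ_cons, List.drop_drop]
            simp [h1, h2]
      · by_cases hbL : (ch == '[') = true
        · have hA : aLoop start idx (st ++ [c]) false false (ch :: tl)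
              = aLoop start (idx + 1) ((st ++ [c]) ++ [']']) false false tl := by
            simp [aLoop, hq, hbL]
          rw [hA, ih tl htl]
          cases hm : scanB fuel ']' tl with
          | none => simp [scanB, hq, hbL, hm]
          | some m =>
            dsimp only
            rw [if_neg (by simp)]
            rw [ih (tl.drop m) (by simp; omega)]
            simp only [scanB, hq, hbL, hm]
            cases hb : scanB fuel c (tl.drop m) with
            | none => simp
            | some k =>
              have h1 : idx + 1 + m + k = idx + (1 + m + k) := by omega
              have h2 : (tl.drop m).drop k = (ch :: tl).drop (1 + m + k) := by
                rw [show 1 + m + k = (m + k) + 1 by omega, List.drop_succ_cons, List.drop_drop]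
              simp [h1, h2]
        · by_cases hbC : (ch == '{') = true
          · have hA : aLoop start idx (st ++ [c]) false false (ch :: tl)
                = aLoop start (idx + 1) ((st ++ [c]) ++ ['}']) false false tl := by
              simp [aLoop, hq, hbL, hbC]
            rw [hA, ih tl htl]
            cases hm : scanB fuel '}' tl with
            | none => simp [scanB, hq, hbL, hbC, hm]
            | some m =>
              dsimp only
              rw [if_neg (by simp)]
              rw [ih (tl.drop m) (by simp; omega)]
              simp only [scanB, hq, hbL, hbC, hm]
              cases hb : scanB fuel c (tl.drop m) with
              | none => simp
              | some k =>
                have h1 : idx + 1 + m + k = idx + (1 + m + k) := by omega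
                have h2 : (tl.drop m).drop k = (ch :: tl).drop (1 + m + k) := by
                  rw [show 1 + m + k = (m + k) + 1 by omega, List.drop_succ_cons, List.drop_drop]
                simp [h1, h2]
          · by_cases hbR : (ch == ']' || ch == '}') = true
            · by_cases hcc : (ch == c) = true
              · by_cases hst : st = []
                · subst hst
                  simp [aLoop, scanB, hq, hbL, hbC, hbR, hcc]
                · simp [aLoop, scanB, hq, hbL, hbC, hbR, hcc, hst, List.drop_succ_cons]
              · simp [aLoop, scanB, hq, hbL, hbC, hbR, hcc]
            · have hA : aLoop start idx (st ++ [c]) false false (ch :: tl)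
                  = aLoop start (idx + 1) (st ++ [c]) false false tl := by
                simp [aLoop, hq, hbL, hbC, hbR]
              rw [hA, ih tl htl]
              simp only [scanB, hq, hbL, hbC, hbR]
              cases hb : scanB fuel c tl with
              | none => simp
              | some k =>
                have h1 : idx + 1 + k = idx + (1 + k) := by omega
                have h2 : tl.drop k = (ch :: tl).drop (1 + k) := by
                  rw [show 1 + k = k + 1 by omega, List.drop_succ_cons]
                simp [h1, h2]

-- ===== VERDICT (by name: the statement is the Claim_ definition above) =====
theorem trim_balanced_json_prefix_py_spec : Claim_equal_trim_balanced_json_prefix_py := by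
  intro text _
  show trim_balanced_json_prefix_py text = trim_balanced_json_prefix_py_alt text
  unfold trim_balanced_json_prefix_py trim_balanced_json_prefix_py_alt
  by_cases ht : text = ""
  · subst ht
    simp [PySem.Chars.lstrip]
  · rw [if_neg ht]
    cases hs : PySem.Chars.lstrip text.toList with
    | nil => rfl
    | cons c0 rest =>
      by_cases h0 : (c0 == '[') = true
      · simp only [h0, Bool.true_or, Bool.not_true, if_pos, Bool.false_eq_true, if_false, if_true]
        rw [show [']'] = ([] : List Char) ++ [']'] by rfl,
            aLoop_scanB rest.length rest le_rfl (c0 :: rest) 1 [] ']']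
        cases hb : scanB rest.length ']' rest with
        | none => simp
        | some n => simp
      · by_cases h1 : (c0 == '{') = true
        · simp only [h0, h1, Bool.false_or, Bool.not_true, Bool.false_eq_true, if_false, if_true]
          rw [show ['}'] = ([] : List Char) ++ ['}'] by rfl,
              aLoop_scanB rest.length rest le_rfl (c0 :: rest) 1 [] '}']
          cases hb : scanB rest.length '}' rest with
          | none => simp
          | some n => simp
        · simp [h0, h1]
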